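-- pv_equiv track=rewrite | github.com/Bianva14/Programacion_ejercicios | clases_búsquedas_ordenaimentos.py | busquedar_secuencial
-- ===== SOURCE A (Python) =====
-- def busquedar_secuencial(lista, v):
--     esta = False
--     if lista == []:
--         esta = False
--     elif lista != []:
--         if v == lista[0]:
--             esta = True
--         elif v!=lista[0]:
--             return busquedar_secuencial(lista[1:],v)
--     return esta
-- ===== SOURCE B (Python) =====
-- def busquedar_secuencial(lista, v):
--     encontrado = False
--     for x in lista:
--         if x == v:
--             encontrado = True
--     return encontrado
-- ===== Notes on version B (the rewrite author's own statement) =====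
-- stated objective: faster
-- what changed: Replaces A's recursion over copied tail slices (quadratic, and recursion-depth-limited) by a flat iterative single-pass loop carrying a found-flag.
import Mathlib
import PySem

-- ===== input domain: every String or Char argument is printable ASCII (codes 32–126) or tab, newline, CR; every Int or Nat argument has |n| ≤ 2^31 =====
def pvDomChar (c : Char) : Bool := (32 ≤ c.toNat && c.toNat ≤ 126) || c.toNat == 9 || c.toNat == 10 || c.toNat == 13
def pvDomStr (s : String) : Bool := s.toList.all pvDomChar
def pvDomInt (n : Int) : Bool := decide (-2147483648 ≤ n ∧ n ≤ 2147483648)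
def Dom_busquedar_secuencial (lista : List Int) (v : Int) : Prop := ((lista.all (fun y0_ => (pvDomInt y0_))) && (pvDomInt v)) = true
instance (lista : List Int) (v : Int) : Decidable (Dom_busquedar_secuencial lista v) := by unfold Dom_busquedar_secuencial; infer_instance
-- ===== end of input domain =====

-- B replaces A's recursion over tail slices by a flat iterative loop carrying a found-flag (simpler decomposition).

-- ===== PORT A =====
-- A: esta = False; empty list keeps esta = False; head match sets esta = True; otherwise recurse on lista[1:].
def busquedar_secuencial (lista : List Int) (v : Int) : Bool :=
  match lista with
  | [] => false
  | h :: t => if v = h then true else busquedar_secuencial t v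

-- ===== PORT B =====
-- B: for x in lista: if x == v: encontrado = True; return encontrado — a fold over the list carrying the flag.
def busquedar_secuencial_alt (lista : List Int) (v : Int) : Bool :=
  lista.foldl (fun encontrado x => if x = v then true else encontrado) false

-- ===== PRECONDITION & SPEC =====
def Spec_busquedar_secuencial (lista : List Int) (v : Int) (out : Bool) : Prop := out = busquedar_secuencial_alt lista v
instance (lista : List Int) (v : Int) (out : Bool) : Decidable (Spec_busquedar_secuencial lista v out) := by unfold Spec_busquedar_secuencial; infer_instance

-- ===== CLAIM (what is proved, stated in full; the proofs are below) =====
def Claim_equal_busquedar_secuencial : Prop := ∀ (lista : List Int) (v : Int), Dom_busquedar_secuencial lista v → Spec_busquedar_secuencial lista v (busquedar_secuencial lista v)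

-- ===== LEMMAS AND PROOFS =====
-- Loop invariant: B's fold from accumulator acc equals acc || (A's result).
theorem foldl_flag_eq (v : Int) (lista : List Int) (acc : Bool) :
    lista.foldl (fun encontrado x => if x = v then true else encontrado) acc
      = (acc || busquedar_secuencial lista v) := by
  induction lista generalizing acc with
  | nil => simp [busquedar_secuencial]
  | cons h t ih =>
    simp only [List.foldl_cons]
    rw [ih]
    by_cases hv : h = v
    · simp [busquedar_secuencial, hv]
    · have hv' : ¬ v = h := fun e => hv e.symm
      simp [busquedar_secuencial, hv, hv']

-- ===== VERDICT (by name: the statement is the Claim_ definition above) =====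
theorem busquedar_secuencial_spec : Claim_equal_busquedar_secuencial := by
  intro lista v _
  unfold Spec_busquedar_secuencial busquedar_secuencial_alt
  rw [foldl_flag_eq]
  simp
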